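-- pv_equiv track=rewrite | github.com/sohaibssb/Automata-Regex-Building-Blocks-for-Compiler-Design | RegexToNFA_ToDFA_ToDFAM/NFAtoDFA.py | get_startstates
-- ===== SOURCE A (Python) =====
-- def get_startstates(startstates,transition):
--     start_arr=[]
--     for start in startstates:
--         arr=[]
--         arr.append(start)
--         for tup in transition:
--             if tup[0]==start and tup[1]=="$":
--                 arr.append(tup[2])
--         start_arr.append(arr)
--     return start_arr
-- ===== SOURCE B (Python) =====
-- def get_startstates(startstates, transition):
--     # build the epsilon-successor index back-to-front, prepending so order is kept
--     eps = {}
--     for src, sym, dst in reversed(transition):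
--         if sym == "$":
--             eps[src] = [dst] + eps.get(src, [])
--     return [[s] + eps.get(s, []) for s in startstates]
-- ===== Notes on version B (the rewrite author's own statement) =====
-- stated objective: faster
-- what changed: Builds one dictionary of epsilon-successors in a single back-to-front pass over the transitions (prepending to keep order), then maps each start state through the index, instead of A's rescan of all transitions for every start state.
import Mathlib
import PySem

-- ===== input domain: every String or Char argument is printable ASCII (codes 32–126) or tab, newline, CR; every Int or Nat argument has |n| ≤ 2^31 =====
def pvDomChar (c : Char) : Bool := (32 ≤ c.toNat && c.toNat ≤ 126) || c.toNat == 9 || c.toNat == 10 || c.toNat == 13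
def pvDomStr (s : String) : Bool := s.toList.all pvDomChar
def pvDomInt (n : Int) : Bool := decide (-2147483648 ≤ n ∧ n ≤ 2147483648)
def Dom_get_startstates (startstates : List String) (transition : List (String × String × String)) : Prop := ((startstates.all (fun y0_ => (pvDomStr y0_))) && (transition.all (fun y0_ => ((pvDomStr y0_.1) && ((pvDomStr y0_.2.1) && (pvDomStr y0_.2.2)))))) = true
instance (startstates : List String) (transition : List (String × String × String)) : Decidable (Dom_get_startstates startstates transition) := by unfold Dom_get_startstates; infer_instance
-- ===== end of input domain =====

-- B builds one dictionary of epsilon-successors in a single back-to-front pass over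
-- the transitions and then maps over the start states, instead of A's per-start rescan.

-- ===== PORT A =====
def get_startstates (startstates : List String) (transition : List (String × String × String)) : List (List String) :=
  startstates.foldl (fun start_arr start =>
    let arr : List String :=
      transition.foldl (fun arr tup =>
        if tup.1 == start && tup.2.1 == "$" then arr ++ [tup.2.2] else arr) [start]
    start_arr ++ [arr]) []

-- ===== PORT B =====
def get_startstates_alt (startstates : List String) (transition : List (String × String × String)) : List (List String) :=
  let eps : PySem.Dict String (List String) :=
    transition.reverse.foldl (fun d tup =>
      if tup.2.1 == "$" then d.insert tup.1 (tup.2.2 :: d.getD tup.1 []) else d) PySem.Dict.empty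
  startstates.map (fun s => [s] ++ eps.getD s [])

-- ===== PRECONDITION & SPEC =====
def Spec_get_startstates (startstates : List String) (transition : List (String × String × String)) (out : List (List String)) : Prop := out = get_startstates_alt startstates transition
instance (startstates : List String) (transition : List (String × String × String)) (out : List (List String)) : Decidable (Spec_get_startstates startstates transition out) := by unfold Spec_get_startstates; infer_instance

-- ===== CLAIM =====
def Claim_equal_get_startstates : Prop := ∀ (startstates : List String) (transition : List (String × String × String)), Dom_get_startstates startstates transition → Spec_get_startstates startstates transition (get_startstates startstates transition)

-- ===== LEMMAS AND PROOFS =====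

-- the back-to-front index's lookup at s is exactly the filtered/mapped transition scan
lemma epsIndex_getD (ts : List (String × String × String)) (s : String) :
    (ts.reverse.foldl (fun d tup =>
        if tup.2.1 == "$" then d.insert tup.1 (tup.2.2 :: d.getD tup.1 []) else d)
        PySem.Dict.empty).getD s []
      = (ts.filter (fun tup => tup.1 == s && tup.2.1 == "$")).map (·.2.2) := by
  rw [List.foldl_reverse]
  induction ts with
  | nil => simp
  | cons t ts ih =>
    obtain ⟨src, sym, dst⟩ := t
    simp only [beq_iff_eq] at ih
    simp only [List.filter_cons, List.foldr_cons]
    by_cases hsym : sym = "$"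
    · by_cases hsrc : src = s
      · subst hsrc; subst hsym
        simp [PySem.Dict.getD_insert_self, ih]
      · simp [hsym, PySem.Dict.getD_insert, hsrc, ih, Ne.symm hsrc]
    · simp [hsym, ih]

-- ===== VERDICT =====
theorem get_startstates_spec : Claim_equal_get_startstates := by
  intro startstates transition _
  unfold Spec_get_startstates get_startstates get_startstates_alt
  rw [PySem.List.foldl_append_singleton_eq_map]
  apply List.map_congr_left
  intro s _
  rw [PySem.List.foldl_append_if, epsIndex_getD]
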